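-- pv_equiv track=rewrite | github.com/Leidylau15/Repositorio_Leidy | CORTE_1/Sesion_9.1/pruebas y ayuditis.py | contar_participaciones
-- ===== SOURCE A (Python) =====
-- def contar_participaciones(data):
--     participaciones_por_pais = {}  # Diccionario para almacenar las participaciones por país
--
--     for fila in data[1:]:  # Excluir la primera fila que contiene los encabezados
--         home_team, away_team, year = fila[0], fila[1], fila[-1]
--
--         # Contar las participaciones del equipo de casa
--         if home_team in participaciones_por_pais:
--             participaciones_por_pais[home_team].append(year)
--         else:
--             participaciones_por_pais[home_team] = [year]
--
--         # Contar las participaciones del equipo visitante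
--         if away_team in participaciones_por_pais:
--             participaciones_por_pais[away_team].append(year)
--         else:
--             participaciones_por_pais[away_team] = [year]
--
--     # Calcular el número total de participaciones por país
--     total_participaciones_por_pais = {}
--     for pais, participaciones in participaciones_por_pais.items():
--         total_participaciones = len(set(participaciones))  # Utiliza un conjunto para eliminar duplicados
--         total_participaciones_por_pais[pais] = total_participaciones
--
--     return total_participaciones_por_pais
-- ===== SOURCE B (Python) =====
-- def contar_participaciones(data):
--     # One flat ordered set of distinct (team, year) pairs (dict keys), then tally teams.
--     pares = {}
--     for fila in data[1:]:
--         year = fila[-1]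
--         pares[(fila[0], year)] = None
--         pares[(fila[1], year)] = None
--     conteo = {}
--     for team, _year in pares:
--         conteo[team] = conteo.get(team, 0) + 1
--     return conteo
-- ===== Notes on version B (the rewrite author's own statement) =====
-- stated objective: simpler
-- what changed: Instead of A's dict of per-country year lists followed by a second dedup-and-count pass, B maintains one flat insertion-ordered set of distinct (team, year) pairs and tallies teams over it in a single final pass.
import Mathlib
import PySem

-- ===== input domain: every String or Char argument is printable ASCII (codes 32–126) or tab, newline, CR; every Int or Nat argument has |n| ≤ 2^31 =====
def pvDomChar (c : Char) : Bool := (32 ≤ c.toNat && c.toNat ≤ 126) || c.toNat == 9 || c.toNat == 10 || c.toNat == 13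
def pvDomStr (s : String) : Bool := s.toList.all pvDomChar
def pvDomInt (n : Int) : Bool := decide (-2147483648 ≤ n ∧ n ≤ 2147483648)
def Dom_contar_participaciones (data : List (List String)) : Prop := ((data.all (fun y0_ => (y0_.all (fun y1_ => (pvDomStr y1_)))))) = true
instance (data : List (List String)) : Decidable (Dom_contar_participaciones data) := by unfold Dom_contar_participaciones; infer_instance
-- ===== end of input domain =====

-- B replaces A's per-country year lists + second dedup-and-count pass by one flat ordered set
-- of distinct (team, year) pairs tallied once at the end (objective: simpler).

-- ===== PORT A =====
-- dict country -> list of years, built row by row; then a second dict counting distinct years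
def contar_participaciones (data : List (List String)) : List (String × Int) :=
  let part : PySem.Dict String (List String) :=
    (data.drop 1).foldl (fun d fila =>
      let home := fila.getD 0 ""
      let away := fila.getD 1 ""
      let year := (PySem.List.pyGet? fila (-1)).getD ""
      let d1 :=
        if d.contains home then d.insert home (d.getD home [] ++ [year])
        else d.insert home [year]
      if d1.contains away then d1.insert away (d1.getD away [] ++ [year])
      else d1.insert away [year]) PySem.Dict.empty
  (part.items.foldl (fun (t : PySem.Dict String Int) pv =>
      t.insert pv.1 ((PySem.Set.ofList pv.2).length : Int)) PySem.Dict.empty).items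

-- ===== PORT B =====
-- one ordered set of distinct (team, year) pairs, then tally teams in one pass
def contar_participaciones_alt (data : List (List String)) : List (String × Int) :=
  let pares : PySem.Set (String × String) :=
    (data.drop 1).foldl (fun s fila =>
      let year := (PySem.List.pyGet? fila (-1)).getD ""
      PySem.Set.add (PySem.Set.add s (fila.getD 0 "", year)) (fila.getD 1 "", year))
      PySem.Set.empty
  (pares.foldl (fun (c : PySem.Dict String Int) p =>
      c.insert p.1 (c.getD p.1 0 + 1)) PySem.Dict.empty).items

-- ===== PRECONDITION & SPEC =====
-- Pre_ excludes inputs where Python A raises IndexError: a data row (after the header) with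
-- fewer than 2 entries (fila[1] or fila[-1] out of range).
def Pre_contar_participaciones (data : List (List String)) : Prop :=
  ∀ fila ∈ data.drop 1, 2 ≤ fila.length
instance (data : List (List String)) : Decidable (Pre_contar_participaciones data) := by
  unfold Pre_contar_participaciones; infer_instance
def pvWitness_contar_participaciones : List (List String) :=
  [["home_team", "away_team", "year"], ["AR", "BR", "1990"], ["AR", "CL", "1990"]]

def Spec_contar_participaciones (data : List (List String)) (out : List (String × Int)) : Prop := out = contar_participaciones_alt data
instance (data : List (List String)) (out : List (String × Int)) : Decidable (Spec_contar_participaciones data out) := by unfold Spec_contar_participaciones; infer_instance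

-- ===== CLAIM (what is proved, stated in full; the proofs are below) =====
def Claim_equal_contar_participaciones : Prop := ∀ (data : List (List String)), Dom_contar_participaciones data → Pre_contar_participaciones data → Spec_contar_participaciones data (contar_participaciones data)

-- ===== LEMMAS AND PROOFS =====

-- the flattened stream of (team, year) pairs both programs process
def pvYear (fila : List String) : String := (PySem.List.pyGet? fila (-1)).getD ""
def pvPairs (data : List (List String)) : List (String × String) :=
  (data.drop 1).flatMap (fun fila =>
    [(fila.getD 0 "", pvYear fila), (fila.getD 1 "", pvYear fila)])

-- A's per-team update (the if/else on membership) is Dict.modify with append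
theorem pv_step_modify (d : PySem.Dict String (List String)) (k y : String) :
    (if d.contains k then d.insert k (d.getD k [] ++ [y]) else d.insert k [y])
      = d.modify k [] (fun x => x ++ [y]) := by
  unfold PySem.Dict.modify
  by_cases h : d.contains k
  · simp [h]
  · simp [h, PySem.Dict.getD_of_not_contains d ([] : List String) (by simpa using h)]

-- A's first loop, re-expressed as one fold over the flattened pair stream
theorem pv_part_eq (data : List (List String)) :
    (data.drop 1).foldl (fun d fila =>
      let home := fila.getD 0 ""
      let away := fila.getD 1 ""
      let year := (PySem.List.pyGet? fila (-1)).getD ""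
      let d1 :=
        if d.contains home then d.insert home (d.getD home [] ++ [year])
        else d.insert home [year]
      if d1.contains away then d1.insert away (d1.getD away [] ++ [year])
      else d1.insert away [year]) PySem.Dict.empty
    = (pvPairs data).foldl
        (fun d p => d.modify p.1 [] (fun x => x ++ [p.2])) PySem.Dict.empty := by
  rw [pvPairs, List.foldl_flatMap]
  congr 1
  funext d fila
  simp only [List.foldl_cons, List.foldl_nil, pvYear]
  rw [pv_step_modify, pv_step_modify]

-- B's first loop, re-expressed: pares = set(flattened pair stream)
theorem pv_pares_eq (data : List (List String)) :
    (data.drop 1).foldl (fun s fila =>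
      let year := (PySem.List.pyGet? fila (-1)).getD ""
      PySem.Set.add (PySem.Set.add s (fila.getD 0 "", year)) (fila.getD 1 "", year))
      PySem.Set.empty
    = PySem.Set.ofList (pvPairs data) := by
  rw [PySem.Set.ofList_eq_foldl, pvPairs, List.foldl_flatMap]
  rfl

-- dedup commutes with projecting to first components, up to dedup
theorem pv_ofList_map_fst (ps : List (String × String)) :
    PySem.Set.ofList ((PySem.Set.ofList ps).map Prod.fst)
      = PySem.Set.ofList (ps.map Prod.fst) := by
  induction ps using List.reverseRecOn with
  | nil => rfl
  | append_singleton ps p ih =>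
    rw [PySem.Set.ofList_append_singleton]
    by_cases hp : p ∈ ps
    · rw [PySem.Set.add_of_mem (by simpa [PySem.Set.mem_ofList] using hp)]
      rw [ih, List.map_append, List.map_singleton, PySem.Set.ofList_append_singleton,
        PySem.Set.add_of_mem (by simp [PySem.Set.mem_ofList]; exact ⟨p.2, hp⟩)]
    · rw [PySem.Set.add_of_not_mem (by simpa [PySem.Set.mem_ofList] using hp),
        List.map_append, List.map_singleton, PySem.Set.ofList_append_singleton, ih,
        List.map_append, List.map_singleton, PySem.Set.ofList_append_singleton]

-- the distinct pairs with first component t are exactly the distinct years of t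
theorem pv_count_eq (ps : List (String × String)) (t : String) :
    List.count t ((PySem.Set.ofList ps).map Prod.fst)
      = (PySem.Set.ofList ((ps.filter (fun p => p.1 == t)).map Prod.snd)).length := by
  induction ps using List.reverseRecOn with
  | nil => rfl
  | append_singleton ps p ih =>
    rw [PySem.Set.ofList_append_singleton, List.filter_append]
    by_cases ht : p.1 = t
    · have hf : List.filter (fun q => q.1 == t) [p] = [p] := by simp [ht]
      by_cases hp : p ∈ ps
      · rw [PySem.Set.add_of_mem (by simpa [PySem.Set.mem_ofList] using hp)]
        have h2 : p.2 ∈ (ps.filter (fun q => q.1 == t)).map Prod.snd :=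
          List.mem_map.2 ⟨p, List.mem_filter.2 ⟨hp, by simp [ht]⟩, rfl⟩
        rw [hf, List.map_append, List.map_singleton, PySem.Set.ofList_append_singleton,
          PySem.Set.add_of_mem (by simpa [PySem.Set.mem_ofList] using h2), ih]
      · have h2 : p.2 ∉ (ps.filter (fun q => q.1 == t)).map Prod.snd := by
          intro hmem
          rcases List.mem_map.1 hmem with ⟨q, hq, hq2⟩
          rcases List.mem_filter.1 hq with ⟨hqs, hq1⟩
          have hq1' : q.1 = t := by simpa using hq1
          have : q = p := Prod.ext (by rw [hq1', ht]) hq2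
          exact hp (this ▸ hqs)
        rw [PySem.Set.add_of_not_mem (by simpa [PySem.Set.mem_ofList] using hp),
          List.map_append, List.map_singleton, List.count_append, ih, hf,
          List.map_append, List.map_singleton, PySem.Set.ofList_append_singleton,
          PySem.Set.add_of_not_mem (by simpa [PySem.Set.mem_ofList] using h2),
          List.length_append]
        simp [ht]
    · have hf : List.filter (fun q => q.1 == t) [p] = [] := by simp [ht]
      rw [hf, List.append_nil]
      by_cases hp : p ∈ ps
      · rw [PySem.Set.add_of_mem (by simpa [PySem.Set.mem_ofList] using hp), ih]
      · rw [PySem.Set.add_of_not_mem (by simpa [PySem.Set.mem_ofList] using hp),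
          List.map_append, List.map_singleton, List.count_append, ih]
        simp [ht]

-- A's output in closed form
theorem pv_A_closed (data : List (List String)) :
    contar_participaciones data
      = (PySem.Set.ofList ((pvPairs data).map Prod.fst)).map (fun k =>
          (k, ((PySem.Set.ofList
              (((pvPairs data).filter (fun p => p.1 == k)).map Prod.snd)).length : Int))) := by
  rw [contar_participaciones]
  rw [pv_part_eq]
  set part := (pvPairs data).foldl
      (fun d p => d.modify p.1 [] (fun x => x ++ [p.2])) PySem.Dict.empty with hpart
  have hkeys : part.keys = PySem.Set.ofList ((pvPairs data).map Prod.fst) := by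
    rw [hpart, PySem.Dict.keys_foldl_modify_key (pvPairs data) Prod.fst []
      (fun _ p => (fun x => x ++ [p.2])) PySem.Dict.empty]
    simp [PySem.Set.update_nil_left, PySem.Dict.keys_empty]
  have hnd : part.keys.Nodup := by
    rw [hpart]
    exact PySem.Dict.nodup_keys_foldl_modify_key (pvPairs data) Prod.fst []
      (fun _ p => (fun x => x ++ [p.2])) PySem.Dict.empty
      (by simp [PySem.Dict.keys_empty])
  have hgetD : ∀ k, part.getD k []
      = ((pvPairs data).filter (fun p => p.1 == k)).map Prod.snd := by
    intro k
    rw [hpart, PySem.Dict.getD_foldl_modify_append]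
    simp [PySem.Dict.getD_empty]
  have hitems : part.items = part.keys.map (fun k => (k, part.getD k [])) :=
    PySem.Dict.items_eq_map_keys part hnd []
  have hmapfst : part.items.map Prod.fst = part.keys := by
    simp [PySem.Dict.keys]
  rw [PySem.Dict.items_foldl_insert_fresh part.items Prod.fst
      (fun pv => ((PySem.Set.ofList pv.2).length : Int)) PySem.Dict.empty
      (by intro a _; simp [PySem.Dict.contains_empty])
      (by rw [hmapfst]; exact hnd)]
  have hempty : (PySem.Dict.empty : PySem.Dict String Int).items = [] := rfl
  rw [hempty, List.nil_append, hitems, hkeys, List.map_map]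
  refine List.map_congr_left (fun k _ => ?_)
  simp [hgetD k]

-- B's output in closed form
theorem pv_B_closed (data : List (List String)) :
    contar_participaciones_alt data
      = (PySem.Set.ofList (((PySem.Set.ofList (pvPairs data)).map Prod.fst))).map (fun k =>
          (k, (List.count k ((PySem.Set.ofList (pvPairs data)).map Prod.fst) : Int))) := by
  rw [contar_participaciones_alt]
  rw [pv_pares_eq]
  rw [show ((PySem.Set.ofList (pvPairs data)).foldl (fun (c : PySem.Dict String Int) p =>
        c.insert p.1 (c.getD p.1 0 + 1)) PySem.Dict.empty)
      = ((PySem.Set.ofList (pvPairs data)).map Prod.fst).foldl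
          (fun (c : PySem.Dict String Int) x => c.insert x (c.getD x 0 + 1))
          PySem.Dict.empty from
    (List.foldl_map (f := Prod.fst)
      (g := fun (c : PySem.Dict String Int) x => c.insert x (c.getD x 0 + 1))
      (l := PySem.Set.ofList (pvPairs data)) (init := PySem.Dict.empty)).symm]
  rw [PySem.Dict.foldl_insert_getD_add_one_eq_counter, PySem.Dict.items_counter]

-- ===== VERDICT (by name: the statement is the Claim_ definition above) =====
theorem contar_participaciones_spec : Claim_equal_contar_participaciones := by
  intro data _ _
  unfold Spec_contar_participaciones
  rw [pv_A_closed, pv_B_closed, pv_ofList_map_fst]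
  exact List.map_congr_left (fun k _ => by rw [pv_count_eq])
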